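-- pv_equiv track=rewrite | github.com/jk-jung/problem-solving | codewars/5kyu/5_Factorial decomposition.py | decomp
-- ===== SOURCE A (Python) =====
-- def decomp(n):
--     r = {}
--     for x in range(2, n + 1):
--         f = 1
--         for y in r:
--             if x % y == 0:
--                 f = 0
--                 break
--         if not f: continue
--
--         k = x
--         r[x] = 0
--         while k <= n:
--             r[x] += n // k
--             k *= x
--
--     return ' * '.join(f"{k}{f'^{v}' if v > 1 else ''}" for k, v in r.items())
-- ===== SOURCE B (Python) =====
-- def decomp(n):
--     if n < 2:
--         return ''
--     sieve = [1] * (n + 1)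
--     for x in range(2, n + 1):
--         for m in range(2 * x, n + 1, x):
--             sieve[m] = 0
--     parts = []
--     for p in range(2, n + 1):
--         if sieve[p]:
--             e, m = 0, n
--             while m:
--                 m //= p
--                 e += m
--             parts.append(f"{p}^{e}" if e > 1 else str(p))
--     return ' * '.join(parts)
-- ===== Notes on version B (the rewrite author's own statement) =====
-- stated objective: faster
-- what changed: Replace A's trial-division primality test (scanning the dict of previously found primes for each candidate) and power-summing exponent loop with a Sieve of Eratosthenes marking multiples once, plus Legendre exponents computed by repeated floor division of n.
import Mathlib
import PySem

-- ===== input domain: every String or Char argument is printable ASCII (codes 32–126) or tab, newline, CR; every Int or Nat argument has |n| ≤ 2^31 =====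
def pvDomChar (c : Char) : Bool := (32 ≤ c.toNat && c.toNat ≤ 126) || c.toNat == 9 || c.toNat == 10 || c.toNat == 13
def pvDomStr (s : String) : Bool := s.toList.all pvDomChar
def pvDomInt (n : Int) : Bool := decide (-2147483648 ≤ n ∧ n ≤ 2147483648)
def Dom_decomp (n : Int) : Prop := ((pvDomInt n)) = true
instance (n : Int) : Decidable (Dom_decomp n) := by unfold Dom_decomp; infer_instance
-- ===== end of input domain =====

-- B replaces A's trial division of each candidate against all previously found primes (and
-- its power-summing exponent loop) by a sieve marking multiples plus Legendre exponents via
-- repeated floor division; the return value is proved equal (no argument is mutated).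

-- ===== PORT A =====
-- 'f = 1; for y in r: if x % y == 0: f = 0; break'  (iterating a dict yields its keys)
def pvFlagA (keys : List Int) (x : Int) : Int :=
  match keys with
  | [] => 1
  | y :: ys => if PySem.Int.mod x y == 0 then 0 else pvFlagA ys x

-- 'k = x; r[x] = 0; while k <= n: r[x] += n // k; k *= x'
-- (the conjuncts 1 ≤ k ∧ 2 ≤ x only make the recursion total: A always starts it with k = x ≥ 2,
--  so on every reachable call they hold and the guard is exactly Python's 'k <= n')
def pvPowA (n x k acc : Int) : Int :=
  if h : k ≤ n ∧ 1 ≤ k ∧ 2 ≤ x then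
    pvPowA n x (k * x) (acc + PySem.Int.floordiv n k)
  else acc
termination_by (n + 1 - k).toNat
decreasing_by
  have h2 : k * 2 ≤ k * x := by
    have := mul_le_mul_of_nonneg_left h.2.2 (by omega : (0:Int) ≤ k)
    omega
  omega

-- f"{k}{f'^{v}' if v > 1 else ''}"
def pvFmtA (kv : Int × Int) : String :=
  PySem.Int.toStr kv.1 ++ (if kv.2 > 1 then "^" ++ PySem.Int.toStr kv.2 else "")

def decomp (n : Int) : String :=
  let r := (PySem.List.pyRange 2 (n + 1) 1).foldl
    (fun r x =>
      let f := pvFlagA r.keys x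
      if f == 0 then r
      else r.insert x (pvPowA n x x 0))
    (PySem.Dict.empty : PySem.Dict Int Int)
  PySem.Str.join " * " (r.items.map pvFmtA)

-- ===== PORT B =====
-- sieve = [1]*(n+1); for x in range(2, n+1): for m in range(2*x, n+1, x): sieve[m] = 0
def pvSieve (n : Int) : List Int :=
  (PySem.List.pyRange 2 (n + 1) 1).foldl
    (fun s x => (PySem.List.pyRange (2 * x) (n + 1) x).foldl
      (fun s m => PySem.List.pySetD s m 0) s)
    (List.replicate (n + 1).toNat 1)

-- 'e, m = 0, n; while m: m //= p; e += m'
-- (the guard 0 < m ∧ 2 ≤ p only makes the recursion total: B starts it with m = n ≥ 2 and a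
--  prime p ≥ 2, and m stays nonnegative, so Python's 'while m' is exactly 'while 0 < m')
def pvLegB (p m e : Int) : Int :=
  if h : 0 < m ∧ 2 ≤ p then
    pvLegB p (PySem.Int.floordiv m p) (e + PySem.Int.floordiv m p)
  else e
termination_by m.toNat
decreasing_by
  have h1 : PySem.Int.floordiv m p < m := by
    rw [PySem.Int.floordiv_lt_iff_lt_mul (by omega)]
    nlinarith [h.1, h.2]
  have h0 : 0 ≤ PySem.Int.floordiv m p := by
    rw [PySem.Int.floordiv_eq_ediv_of_pos (by omega)]
    exact Int.ediv_nonneg (by omega) (by omega)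
  omega

-- f"{p}^{e}" if e > 1 else str(p)
def pvFmtB (p e : Int) : String :=
  if e > 1 then PySem.Int.toStr p ++ "^" ++ PySem.Int.toStr e else PySem.Int.toStr p

def decomp_alt (n : Int) : String :=
  if n < 2 then "" else
  let sieve := pvSieve n
  let parts := (PySem.List.pyRange 2 (n + 1) 1).foldl
    (fun parts p =>
      if PySem.List.pyGetD sieve p 0 != 0 then parts ++ [pvFmtB p (pvLegB p n 0)]
      else parts)
    []
  PySem.Str.join " * " parts

-- ===== PRECONDITION & SPEC =====
def Spec_decomp (n : Int) (out : String) : Prop := out = decomp_alt n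
instance (n : Int) (out : String) : Decidable (Spec_decomp n out) := by unfold Spec_decomp; infer_instance

-- ===== CLAIM (what is proved, stated in full; the proofs are below) =====
def Claim_equal_decomp : Prop := ∀ (n : Int), Dom_decomp n → Spec_decomp n (decomp n)

-- ===== LEMMAS AND PROOFS =====

-- the ascending list of primes in [a, b)
def pvPrimes (a b : Int) : List Int :=
  (PySem.List.pyRange a b 1).filter (fun x => decide (Nat.Prime x.toNat))

-- accumulator-free form of B's exponent loop
def pvLeg (x m : Int) : Int :=
  if h : 0 < m ∧ 2 ≤ x then
    PySem.Int.floordiv m x + pvLeg x (PySem.Int.floordiv m x)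
  else 0
termination_by m.toNat
decreasing_by
  have h1 : PySem.Int.floordiv m x < m := by
    rw [PySem.Int.floordiv_lt_iff_lt_mul (by omega)]
    nlinarith [h.1, h.2]
  have h0 : 0 ≤ PySem.Int.floordiv m x := by
    rw [PySem.Int.floordiv_eq_ediv_of_pos (by omega)]
    exact Int.ediv_nonneg (by omega) (by omega)
  omega

-- ===== exponents: A's sum over the powers of x equals B's repeated division =====

lemma pvLegB_eq (p m e : Int) : pvLegB p m e = e + pvLeg p m := by
  induction m, e using pvLegB.induct p with
  | case1 m e h ih => rw [pvLegB, pvLeg, dif_pos h, dif_pos h, ih]; ring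
  | case2 m e h => rw [pvLegB, pvLeg, dif_neg h, dif_neg h]; ring

lemma pvLeg_of_zero_div (x m : Int) (hx : 2 ≤ x) (h : PySem.Int.floordiv m x = 0) :
    pvLeg x m = 0 := by
  by_cases hm : 0 < m
  · rw [pvLeg, dif_pos ⟨hm, hx⟩, h, pvLeg]; simp
  · rw [pvLeg, dif_neg]; tauto

lemma pv_ediv_ediv (n k x : Int) (hk : 1 ≤ k) (hx : 2 ≤ x) :
    PySem.Int.floordiv (PySem.Int.floordiv n k) x = PySem.Int.floordiv n (k * x) := by
  rw [PySem.Int.floordiv_eq_ediv_of_pos (by omega : (0:Int) < k),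
      PySem.Int.floordiv_eq_ediv_of_pos (by omega : (0:Int) < x),
      PySem.Int.floordiv_eq_ediv_of_pos (by positivity : (0:Int) < k * x)]
  exact Int.ediv_ediv_eq_ediv_mul (by omega)

lemma pvPowA_eq (n x : Int) (hx : 2 ≤ x) (hn : 0 ≤ n) :
    ∀ k acc, 1 ≤ k →
      pvPowA n x k acc = acc + (if k ≤ n then
        PySem.Int.floordiv n k + pvLeg x (PySem.Int.floordiv n k) else 0) := by
  intro k acc
  induction k, acc using pvPowA.induct n x with
  | case1 k acc h ih =>
    intro _
    have hk : 1 ≤ k := h.2.1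
    have hdd := pv_ediv_ediv n k x hk hx
    have hpos : 1 ≤ PySem.Int.floordiv n k :=
      (PySem.Int.le_floordiv_iff_mul_le (by omega)).2 (by omega)
    rw [pvPowA, dif_pos h, ih (by nlinarith), if_pos h.1]
    by_cases hkx : k * x ≤ n
    · rw [if_pos hkx]
      conv_rhs => rw [pvLeg, dif_pos ⟨by omega, hx⟩]
      rw [hdd]; ring
    · rw [if_neg hkx]
      have h0 : PySem.Int.floordiv n (k * x) = 0 := by
        have hlt : PySem.Int.floordiv n (k * x) < 1 :=
          (PySem.Int.floordiv_lt_iff_lt_mul (by positivity)).2 (by omega)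
        have hge : 0 ≤ PySem.Int.floordiv n (k * x) := by
          rw [PySem.Int.floordiv_eq_ediv_of_pos (by positivity)]
          exact Int.ediv_nonneg hn (by positivity)
        omega
      rw [pvLeg_of_zero_div x _ hx (hdd ▸ h0)]; ring
  | case2 k acc h =>
    intro hk
    rw [pvPowA, dif_neg h, if_neg (by tauto)]; ring

lemma pv_exponents_agree (n p : Int) (hp : 2 ≤ p) (hpn : p ≤ n) :
    pvPowA n p p 0 = pvLegB p n 0 := by
  rw [pvLegB_eq, pvPowA_eq n p hp (by omega) p 0 (by omega), if_pos hpn]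
  conv_rhs => rw [pvLeg, dif_pos ⟨by omega, hp⟩]

-- ===== primality: both loops detect exactly the primes =====

lemma pvFlagA_eq_zero_iff (keys : List Int) (x : Int) :
    pvFlagA keys x = 0 ↔ ∃ y ∈ keys, PySem.Int.mod x y = 0 := by
  induction keys with
  | nil => simp [pvFlagA]
  | cons y ys ih =>
    simp only [pvFlagA]
    by_cases h : PySem.Int.mod x y = 0
    · simp [h]
    · simp only [beq_iff_eq, if_neg h, ih, List.mem_cons]
      constructor
      · rintro ⟨z, hz, hm⟩; exact ⟨z, Or.inr hz, hm⟩
      · rintro ⟨z, hz | hz, hm⟩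
        · exact absurd (hz ▸ hm) h
        · exact ⟨z, hz, hm⟩

lemma pv_composite_iff_prime_dvd (a : Nat) (ha : 2 ≤ a) :
    (∃ q, q.Prime ∧ q < a ∧ q ∣ a) ↔ ¬ a.Prime := by
  constructor
  · rintro ⟨q, hq, hlt, hdvd⟩ hp
    rcases (hp.eq_one_or_self_of_dvd q hdvd) with h | h
    · exact absurd h (Nat.Prime.ne_one hq)
    · omega
  · intro hnp
    refine ⟨a.minFac, Nat.minFac_prime (by omega), ?_, Nat.minFac_dvd a⟩
    have hle := Nat.minFac_le (show 0 < a by omega)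
    rcases lt_or_eq_of_le hle with h | h
    · exact h
    · exact absurd (h ▸ Nat.minFac_prime (show a ≠ 1 by omega)) hnp

lemma pv_flag_prime (X : Int) (hX : 2 ≤ X) :
    (pvFlagA (pvPrimes 2 X) X = 0) ↔ ¬ Nat.Prime X.toNat := by
  rw [pvFlagA_eq_zero_iff, ← pv_composite_iff_prime_dvd X.toNat (by omega)]
  constructor
  · rintro ⟨y, hy, hm⟩
    rw [pvPrimes, List.mem_filter] at hy
    obtain ⟨hyr, hyp⟩ := hy
    rw [PySem.List.mem_pyRange_one] at hyr
    refine ⟨y.toNat, by simpa using hyp, by omega, ?_⟩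
    rw [PySem.Int.mod_eq_zero_iff_dvd] at hm
    have : (y.toNat : Int) ∣ (X.toNat : Int) := by
      rwa [Int.toNat_of_nonneg (by omega), Int.toNat_of_nonneg (by omega)]
    exact_mod_cast this
  · rintro ⟨q, hq, hlt, hdvd⟩
    refine ⟨(q : Int), ?_, ?_⟩
    · rw [pvPrimes, List.mem_filter, PySem.List.mem_pyRange_one]
      have h2 := hq.two_le
      constructor
      · constructor <;> [exact_mod_cast h2; omega]
      · simp [hq]
    · rw [PySem.Int.mod_eq_zero_iff_dvd]
      have : (q : Int) ∣ (X.toNat : Int) := Int.natCast_dvd_natCast.2 hdvd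
      rwa [Int.toNat_of_nonneg (by omega)] at this

-- A's fold over [2, X) builds exactly the primes of [2, X) with their pvPowA exponents
lemma pv_foldA_items (n : Int) (X : Int) (hX : 2 ≤ X) :
    ((PySem.List.pyRange 2 X 1).foldl
      (fun r x =>
        let f := pvFlagA r.keys x
        if f == 0 then r
        else r.insert x (pvPowA n x x 0))
      (PySem.Dict.empty : PySem.Dict Int Int)).items
    = (pvPrimes 2 X).map (fun p => (p, pvPowA n p p 0)) := by
  induction X, hX using Int.le_induction with
  | base =>
    rw [PySem.List.pyRange_one_eq_nil (by omega)]
    rw [pvPrimes, PySem.List.pyRange_one_eq_nil (by omega)]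
    rfl
  | succ X hX ih =>
    rw [PySem.List.pyRange_one_succ_right (by omega), List.foldl_append]
    set d := (PySem.List.pyRange 2 X 1).foldl
      (fun r x =>
        let f := pvFlagA r.keys x
        if f == 0 then r
        else r.insert x (pvPowA n x x 0))
      (PySem.Dict.empty : PySem.Dict Int Int) with hd
    have hkeys : d.keys = pvPrimes 2 X := by
      have : d.keys = d.items.map (·.1) := rfl
      rw [this, ih, List.map_map]
      exact List.map_id _
    have hfilter : pvPrimes 2 (X + 1)
        = pvPrimes 2 X ++ if Nat.Prime X.toNat then [X] else [] := by
      rw [pvPrimes, pvPrimes, PySem.List.pyRange_one_succ_right (by omega), List.filter_append]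
      by_cases hp : Nat.Prime X.toNat <;> simp [hp]
    simp only [List.foldl_cons, List.foldl_nil]
    by_cases hp : Nat.Prime X.toNat
    · have hflag : pvFlagA d.keys X ≠ 0 := by
        intro h
        rw [hkeys, pv_flag_prime X (by omega)] at h; exact h hp
      rw [if_neg (by simpa using hflag)]
      have hnc : d.contains X = false := by
        rw [PySem.Dict.contains_eq_decide_mem_keys, hkeys, decide_eq_false_iff_not]
        intro hmem
        rw [pvPrimes, List.mem_filter, PySem.List.mem_pyRange_one] at hmem
        omega
      rw [PySem.Dict.items_insert_of_not_contains d _ hnc, ih, hfilter, if_pos hp]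
      simp
    · have hflag : pvFlagA d.keys X = 0 := by
        rw [hkeys, pv_flag_prime X (by omega)]; exact hp
      rw [if_pos (by simpa using hflag), ih, hfilter, if_neg hp]
      simp

-- ===== sieve correctness =====

lemma pv_inner_fold_length (ms : List Int) (s : List Int) :
    (ms.foldl (fun s m => PySem.List.pySetD s m 0) s).length = s.length := by
  induction ms generalizing s with
  | nil => rfl
  | cons m ms ih => simp [List.foldl_cons, ih, PySem.List.length_pySetD]

lemma pv_set_get (s : List Int) (m i : Int) (hm0 : 0 ≤ m) (hm1 : m < (s.length : Int))
    (hi0 : 0 ≤ i) (hi1 : i < (s.length : Int)) :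
    PySem.List.pyGetD (PySem.List.pySetD s m 0) i 0
      = if i = m then 0 else PySem.List.pyGetD s i 0 := by
  rw [PySem.List.pySetD_of_nonneg s 0 hm0,
      PySem.List.pyGetD_eq_getElem _ 0 hi0 (by simpa using hi1),
      PySem.List.pyGetD_eq_getElem _ 0 hi0 hi1,
      List.getElem_set]
  by_cases h : i = m
  · rw [if_pos h, if_pos (by omega)]
  · rw [if_neg h, if_neg (by omega)]

lemma pv_inner_fold_get (ms : List Int) (s : List Int) (i : Int)
    (hi0 : 0 ≤ i) (hi1 : i < (s.length : Int))
    (hms : ∀ m ∈ ms, 0 ≤ m ∧ m < (s.length : Int)) :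
    PySem.List.pyGetD (ms.foldl (fun s m => PySem.List.pySetD s m 0) s) i 0
      = if i ∈ ms then 0 else PySem.List.pyGetD s i 0 := by
  induction ms generalizing s with
  | nil => simp
  | cons m ms ih =>
    rw [List.foldl_cons]
    have hm := hms m (List.mem_cons_self ..)
    have hlen : ((PySem.List.pySetD s m 0).length : Int) = (s.length : Int) := by
      rw [PySem.List.length_pySetD]
    rw [ih _ (by rw [hlen]; omega) (fun x hx => by
      have := hms x (List.mem_cons_of_mem _ hx); rw [hlen]; omega)]
    rw [pv_set_get s m i hm.1 hm.2 hi0 hi1]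
    by_cases h1 : i ∈ ms
    · rw [if_pos h1, if_pos (List.mem_cons_of_mem _ h1)]
    · rw [if_neg h1]
      by_cases h2 : i = m
      · rw [if_pos h2, if_pos (by simp [h2])]
      · rw [if_neg h2, if_neg (by simp [h1, h2])]

-- the sieve fold stopped after processing [2, X)
def pvSieveFold (n X : Int) : List Int :=
  (PySem.List.pyRange 2 X 1).foldl
    (fun s x => (PySem.List.pyRange (2 * x) (n + 1) x).foldl
      (fun s m => PySem.List.pySetD s m 0) s)
    (List.replicate (n + 1).toNat 1)

lemma pvSieve_eq (n : Int) : pvSieve n = pvSieveFold n (n + 1) := rfl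

lemma pv_outer_length_aux (n : Int) (l : List Int) (s : List Int) :
    (l.foldl (fun s x => (PySem.List.pyRange (2 * x) (n + 1) x).foldl
      (fun s m => PySem.List.pySetD s m 0) s) s).length = s.length := by
  induction l generalizing s with
  | nil => rfl
  | cons x l ih => rw [List.foldl_cons, ih, pv_inner_fold_length]

lemma pv_outer_length (n X : Int) (hn : 0 ≤ n) : ((pvSieveFold n X).length : Int) = n + 1 := by
  unfold pvSieveFold
  rw [pv_outer_length_aux, List.length_replicate]
  omega

lemma pv_foldS_get (n : Int) (hn : 0 ≤ n) (X : Int) (hX : 2 ≤ X)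
    (i : Int) (hi0 : 0 ≤ i) (hi1 : i ≤ n) :
    PySem.List.pyGetD (pvSieveFold n X) i 0
    = if ∃ x ∈ PySem.List.pyRange 2 X 1, i ∈ PySem.List.pyRange (2 * x) (n + 1) x
      then 0 else 1 := by
  induction X, hX using Int.le_induction with
  | base =>
    unfold pvSieveFold
    rw [PySem.List.pyRange_one_eq_nil (by omega)]
    simp only [List.foldl_nil, List.not_mem_nil, false_and, exists_false, if_false]
    rw [PySem.List.pyGetD_eq_getElem _ 0 hi0 (by simp; omega)]
    simp [List.getElem_replicate]
  | succ X hX ih =>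
    have hstep : pvSieveFold n (X + 1)
        = (PySem.List.pyRange (2 * X) (n + 1) X).foldl
            (fun s m => PySem.List.pySetD s m 0) (pvSieveFold n X) := by
      unfold pvSieveFold
      rw [PySem.List.pyRange_one_succ_right (by omega), List.foldl_append,
        List.foldl_cons, List.foldl_nil]
    have hlen := pv_outer_length n X hn
    rw [hstep, pv_inner_fold_get (PySem.List.pyRange (2 * X) (n + 1) X) (pvSieveFold n X) i hi0
        (by rw [hlen]; omega)
        (fun m hm => by
          rw [PySem.List.mem_pyRange_iff_of_pos (by omega)] at hm
          exact ⟨by omega, by rw [hlen]; omega⟩),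
      ih]
    by_cases h1 : i ∈ PySem.List.pyRange (2 * X) (n + 1) X
    · rw [if_pos h1, if_pos ⟨X, by rw [PySem.List.mem_pyRange_one]; omega, h1⟩]
    · rw [if_neg h1]
      by_cases h2 : ∃ x ∈ PySem.List.pyRange 2 X 1, i ∈ PySem.List.pyRange (2 * x) (n + 1) x
      · obtain ⟨x, hx, hix⟩ := h2
        rw [if_pos ⟨x, hx, hix⟩, if_pos ⟨x, by
          rw [PySem.List.mem_pyRange_one] at hx ⊢; omega, hix⟩]
      · rw [if_neg h2, if_neg (by
          rintro ⟨x, hx, hix⟩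
          rw [PySem.List.mem_pyRange_one] at hx
          by_cases hxX : x = X
          · exact h1 (hxX ▸ hix)
          · exact h2 ⟨x, by rw [PySem.List.mem_pyRange_one]; omega, hix⟩)]

lemma pv_composite_iff_small_dvd (a : Nat) (ha : 2 ≤ a) :
    (∃ x, 2 ≤ x ∧ 2 * x ≤ a ∧ x ∣ a) ↔ ¬ a.Prime := by
  constructor
  · rintro ⟨x, hx2, hxa, hdvd⟩ hp
    rcases hp.eq_one_or_self_of_dvd x hdvd with h | h <;> omega
  · intro hnp
    obtain ⟨q, hq, hlt, hdvd⟩ := (pv_composite_iff_prime_dvd a ha).2 hnp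
    obtain ⟨c, hc⟩ := hdvd
    have hq2 := hq.two_le
    have hc2 : 2 ≤ c := by
      rcases Nat.lt_or_ge c 2 with h | h
      · interval_cases c <;> omega
      · exact h
    exact ⟨q, hq2, by nlinarith, ⟨c, hc⟩⟩

lemma pv_sieve_prime (n : Int) (hn : 2 ≤ n) (p : Int) (hp2 : 2 ≤ p) (hpn : p ≤ n) :
    (PySem.List.pyGetD (pvSieve n) p 0 ≠ 0) ↔ Nat.Prime p.toNat := by
  rw [pvSieve_eq, pv_foldS_get n (by omega) (n + 1) (by omega) p (by omega) hpn]
  have hiff : (∃ x ∈ PySem.List.pyRange 2 (n + 1) 1, p ∈ PySem.List.pyRange (2 * x) (n + 1) x)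
      ↔ ¬ Nat.Prime p.toNat := by
    rw [← pv_composite_iff_small_dvd p.toNat (by omega)]
    constructor
    · rintro ⟨x, hx, hpx⟩
      rw [PySem.List.mem_pyRange_one] at hx
      rw [PySem.List.mem_pyRange_iff_of_pos (by omega)] at hpx
      have hdvd : x ∣ p := (dvd_sub_left ⟨2, by ring⟩).1 hpx.2.2
      refine ⟨x.toNat, by omega, by omega, ?_⟩
      have : (x.toNat : Int) ∣ (p.toNat : Int) := by
        rwa [Int.toNat_of_nonneg (by omega), Int.toNat_of_nonneg (by omega)]
      exact_mod_cast this
    · rintro ⟨x, hx2, hxp, hdvd⟩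
      refine ⟨(x : Int), by rw [PySem.List.mem_pyRange_one]; omega, ?_⟩
      rw [PySem.List.mem_pyRange_iff_of_pos (by exact_mod_cast (by omega : 0 < x))]
      have hdvd2 : (x : Int) ∣ p := by
        have : (x : Int) ∣ (p.toNat : Int) := Int.natCast_dvd_natCast.2 hdvd
        rwa [Int.toNat_of_nonneg (by omega)] at this
      exact ⟨by omega, by omega, (dvd_sub_left ⟨2, by ring⟩).2 hdvd2⟩
  by_cases h : Nat.Prime p.toNat
  · rw [if_neg (by rw [hiff]; simpa using h)]; simp [h]
  · rw [if_pos (hiff.2 h)]; simp [h]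

-- ===== formats agree, and assembly =====

lemma pv_fmt_agree (p e : Int) : pvFmtA (p, e) = pvFmtB p e := by
  unfold pvFmtA pvFmtB
  by_cases h : e > 1
  · simp [h, String.append_assoc]
  · simp [h, String.append_empty]

theorem decomp_eq_alt (n : Int) : decomp n = decomp_alt n := by
  by_cases hn : n < 2
  · rw [decomp_alt, if_pos hn]
    unfold decomp
    rw [PySem.List.pyRange_one_eq_nil (by omega)]
    rfl
  · push_neg at hn
    unfold decomp decomp_alt
    rw [if_neg (by omega)]
    simp only []
    rw [pv_foldA_items n (n + 1) (by omega)]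
    rw [PySem.List.foldl_append_if
      (fun p => PySem.List.pyGetD (pvSieve n) p 0 != 0)
      (fun p => pvFmtB p (pvLegB p n 0)) (PySem.List.pyRange 2 (n + 1) 1) []]
    rw [List.nil_append]
    congr 1
    rw [List.filter_congr (l := PySem.List.pyRange 2 (n + 1) 1)
      (q := fun x => decide (Nat.Prime x.toNat)) (fun x hx => by
        rw [PySem.List.mem_pyRange_one] at hx
        by_cases hp : Nat.Prime x.toNat
        · have := (pv_sieve_prime n hn x (by omega) (by omega)).2 hp
          simp [hp, this]
        · have : ¬ PySem.List.pyGetD (pvSieve n) x 0 ≠ 0 := by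
            rw [pv_sieve_prime n hn x (by omega) (by omega)]; exact hp
          simp only [ne_eq, not_not] at this
          simp [hp, this])]
    rw [List.map_map]
    refine List.map_congr_left (fun p hp => ?_)
    rw [pvPrimes, List.mem_filter, PySem.List.mem_pyRange_one] at hp
    simp only [Function.comp]
    rw [pv_fmt_agree, pv_exponents_agree n p (by omega) (by omega)]

-- ===== VERDICT (by name: the statement is the Claim_ definition above) =====
theorem decomp_spec : Claim_equal_decomp := by
  intro n _
  unfold Spec_decomp
  exact decomp_eq_alt n
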